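-- pv_equiv track=rewrite | github.com/pcalg/adventofcode | solutions/year_2019/day16_2.py | calc_next_output
-- ===== SOURCE A (Python) =====
-- def calc_next_output(signal):
--     running_sum = 0
--     result = list()
--
--     # to improve, we could just keep the reverse signal.
--     signal_rev = signal[::-1]
--
--     for digit in signal_rev:
--         running_sum += digit
--         # abs not needed here, because only multiplication by 1 is needed
--         result.append(running_sum % 10)
--
--     return result[::-1]
-- ===== SOURCE B (Python) =====
-- def calc_next_output(sig):
--     n = len(sig)
--     result = [0] * n
--     total = sum(sig)
--     i = 0
--     while i < n:
--         result[i] = total % 10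
--         total -= sig[i]
--         i += 1
--     return result
-- ===== Notes on version B (the rewrite author's own statement) =====
-- stated objective: alternative
-- what changed: B preallocates the output and fills it with an index-based while loop, deriving each suffix sum by subtracting digits from the total computed once, instead of A's reverse-accumulate-append-reverse.
import Mathlib
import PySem

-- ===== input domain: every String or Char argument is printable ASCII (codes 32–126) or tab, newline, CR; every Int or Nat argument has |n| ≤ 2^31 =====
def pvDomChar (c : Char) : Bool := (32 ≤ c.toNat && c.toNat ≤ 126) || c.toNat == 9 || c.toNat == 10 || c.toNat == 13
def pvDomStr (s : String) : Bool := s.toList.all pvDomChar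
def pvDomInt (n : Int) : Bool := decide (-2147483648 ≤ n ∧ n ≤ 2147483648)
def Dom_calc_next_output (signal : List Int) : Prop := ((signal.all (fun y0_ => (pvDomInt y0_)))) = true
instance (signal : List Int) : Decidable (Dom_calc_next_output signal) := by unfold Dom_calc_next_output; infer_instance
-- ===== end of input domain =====

-- B fills a preallocated output list with an indexed while loop using total-minus-running subtraction, instead of A's reverse-accumulate-reverse.


-- ===== PORT A =====
-- signal[::-1] ported via PySem.List.slice?; the loop is a foldl over (running_sum, result)
def calc_next_output (signal : List Int) : List Int :=
  let signal_rev := (PySem.List.slice? signal none none (-1)).getD []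
  let st := signal_rev.foldl
    (fun (st : Int × List Int) digit =>
      (st.1 + digit, st.2 ++ [PySem.Int.mod (st.1 + digit) 10]))
    (0, [])
  ((PySem.List.slice? st.2 none none (-1)).getD [])

-- ===== PORT B =====
-- the while loop: result[i] = total % 10; total -= signal[i]; i += 1
-- (signal[i] is accessed with 0 ≤ i < len in the loop, so the bounded getElem is exact)
def pvWhileB (signal : List Int) (result : List Int) (total : Int) (i : Nat) : List Int :=
  if h : i < signal.length then
    pvWhileB signal (result.set i (PySem.Int.mod total 10)) (total - signal[i]) (i + 1)
  else result
termination_by signal.length - i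

def calc_next_output_alt (signal : List Int) : List Int :=
  pvWhileB signal (List.replicate signal.length 0) (signal.foldl (· + ·) 0) 0

-- ===== PRECONDITION & SPEC =====
def Spec_calc_next_output (signal : List Int) (out : List Int) : Prop := out = calc_next_output_alt signal
instance (signal : List Int) (out : List Int) : Decidable (Spec_calc_next_output signal out) := by unfold Spec_calc_next_output; infer_instance

-- ===== CLAIM (what is proved, stated in full; the proofs are below) =====
def Claim_equal_calc_next_output : Prop := ∀ (signal : List Int), Dom_calc_next_output signal → Spec_calc_next_output signal (calc_next_output signal)

-- ===== LEMMAS AND PROOFS =====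

/-- running sums mod 10 of `l`, starting from `s` (A's loop body) -/
def pvG (l : List Int) (s : Int) : List Int :=
  match l with
  | [] => []
  | d :: t => PySem.Int.mod (s + d) 10 :: pvG t (s + d)

/-- `r % 10` then peel `d` off `r` (the common suffix-sum characterisation) -/
def pvJ (l : List Int) (r : Int) : List Int :=
  match l with
  | [] => []
  | d :: t => PySem.Int.mod r 10 :: pvJ t (r - d)

theorem foldlA_eq (l : List Int) (s : Int) (acc : List Int) :
    (l.foldl (fun (st : Int × List Int) digit =>
      (st.1 + digit, st.2 ++ [PySem.Int.mod (st.1 + digit) 10])) (s, acc)) =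
    (s + l.sum, acc ++ pvG l s) := by
  induction l generalizing s acc with
  | nil => simp [pvG]
  | cons d t ih =>
    simp only [List.foldl_cons, ih, pvG]
    rw [Prod.ext_iff]
    refine ⟨by simp; ring, by simp⟩

theorem pvG_append (a b : List Int) (s : Int) :
    pvG (a ++ b) s = pvG a s ++ pvG b (s + a.sum) := by
  induction a generalizing s with
  | nil => simp [pvG]
  | cons d t ih => simp [pvG, ih, add_assoc]

theorem pvG_rev (l : List Int) :
    (pvG l.reverse 0).reverse = pvJ l l.sum := by
  induction l with
  | nil => simp [pvG, pvJ]
  | cons d t ih =>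
    simp only [List.reverse_cons, pvG_append, pvG, pvJ, List.reverse_append,
      List.reverse_cons, List.reverse_nil, List.nil_append, List.cons_append,
      zero_add, List.sum_cons]
    rw [show t.reverse.sum + d = d + t.sum by rw [List.sum_reverse]; ring,
        show d + t.sum - d = t.sum by ring, ih]

theorem foldl_add_eq_sum (l : List Int) : l.foldl (· + ·) 0 = l.sum := by
  simp [List.sum_eq_foldl]

theorem pvTakeSetAppend {α : Type} (l : List α) (i : Nat) (a : α)
    (h : i < l.length) : (l.set i a).take (i + 1) = l.take i ++ [a] := by
  rw [List.take_add_one]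
  simp [List.take_set_of_le, h]

theorem pvWhileB_eq (signal : List Int) (i : Nat) (result : List Int) (total : Int)
    (hlen : result.length = signal.length) (hi : i ≤ signal.length) :
    pvWhileB signal result total i = result.take i ++ pvJ (signal.drop i) total := by
  induction h : signal.length - i generalizing i result total with
  | zero =>
    have hi' : i = signal.length := by omega
    rw [pvWhileB]
    simp [hi', List.take_of_length_le (le_of_eq hlen)]
    simp [pvJ]
  | succ n ih =>
    have hlt : i < signal.length := by omega
    rw [pvWhileB]
    simp only [hlt, dif_pos]
    rw [ih (i + 1) _ _ (by simp [hlen]) (by omega) (by omega)]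
    have hdrop : signal.drop i = signal[i] :: signal.drop (i + 1) :=
      List.drop_eq_getElem_cons hlt
    rw [hdrop]
    simp only [pvJ]
    rw [pvTakeSetAppend]
    · simp
    · omega
  
-- ===== VERDICT (by name: the statement is the Claim_ definition above) =====
theorem calc_next_output_spec : Claim_equal_calc_next_output := by
  intro signal _
  show calc_next_output signal = calc_next_output_alt signal
  unfold calc_next_output calc_next_output_alt
  simp only [PySem.List.slice?_none_none_neg_one, Option.getD_some, foldlA_eq,
    foldl_add_eq_sum, List.nil_append]
  rw [pvWhileB_eq signal 0 _ _ (by simp) (by omega)]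
  simpa using pvG_rev signal
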